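-- pv_equiv track=rewrite | github.com/syandelbart/KUL-Beginselen-Van-Programmeren | Practicum/Practicum 2/bvp-practicum2.py | geef_populariteits_lijst
-- ===== SOURCE A (Python) =====
-- def geef_populariteits_lijst(sn):
--     popularity_list = {}
--     popularity_numbers = []
--     for key in sn:
--         popularity_list[key] = len(sn[key])
--         popularity_numbers.append(len(sn[key]))
--
--     popularity_numbers = sorted(popularity_numbers,reverse = True)
--     popularity_people = sorted(popularity_list)
--
--     new_list = []
--     for number in popularity_numbers:
--         counter = 0
--         while counter < len(popularity_people):
--             key = popularity_people[counter]
--             if number == popularity_list[key]: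
--                 new_list.append(key)
--                 popularity_people.remove(key)
--                 counter = len(popularity_people)
--             counter += 1
--     return new_list
-- ===== SOURCE B (Python) =====
-- def geef_populariteits_lijst(sn):
--     # index: popularity count -> list of names having that count (insertion order)
--     buckets = {}
--     for name in sn:
--         buckets.setdefault(len(sn[name]), []).append(name)
--     result = []
--     for count in sorted(buckets, reverse=True):
--         result += sorted(buckets[count])
--     return result
-- ===== Notes on version B (the rewrite author's own statement) =====
-- stated objective: faster
-- what changed: B builds a dict bucketing names by popularity count in one pass and emits each bucket sorted once per distinct count, instead of A's per-number linear rescans of (and removals from) the alphabetical people list.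
import Mathlib
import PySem

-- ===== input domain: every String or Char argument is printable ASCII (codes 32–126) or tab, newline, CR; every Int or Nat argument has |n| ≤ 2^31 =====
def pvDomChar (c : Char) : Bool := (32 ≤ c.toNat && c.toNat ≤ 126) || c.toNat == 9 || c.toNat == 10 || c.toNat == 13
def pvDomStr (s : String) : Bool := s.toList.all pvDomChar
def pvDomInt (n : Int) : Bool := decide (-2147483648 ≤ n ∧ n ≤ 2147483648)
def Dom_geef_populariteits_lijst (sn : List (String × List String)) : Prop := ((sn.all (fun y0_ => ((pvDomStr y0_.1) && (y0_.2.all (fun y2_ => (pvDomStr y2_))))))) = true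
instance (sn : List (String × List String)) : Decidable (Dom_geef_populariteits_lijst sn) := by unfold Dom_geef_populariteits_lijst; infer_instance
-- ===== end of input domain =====

-- B replaces A's per-number rescans of the alphabetical people list by a count→names index
-- traversed once per distinct count (objective: fewer passes / different decomposition).

-- ===== PORT A =====
-- A's inner `while counter < len(popularity_people)` loop: it scans popularity_people from
-- the front and stops at the first key whose popularity equals number (A's
-- `counter = len(popularity_people)` is a break), reporting that key (none = no hit).
def pvInnerA (pl : PySem.Dict String Int) (number : Int) : List String → Option String
  | [] => none
  | k :: rest => if pl.getD k 0 == number then some k else pvInnerA pl number rest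

-- A's outer `for number in popularity_numbers` loop; on a hit the key is appended to
-- new_list and removed from popularity_people (`remove?` is `some` here: the key came
-- from the list, so Python's list.remove cannot raise).
def pvOuterA (pl : PySem.Dict String Int) : List Int → List String → List String → List String
  | [], _, acc => acc
  | n :: ns, people, acc =>
    match pvInnerA pl n people with
    | some k => pvOuterA pl ns ((PySem.List.remove? people k).getD people) (acc ++ [k])
    | none => pvOuterA pl ns people acc

def geef_populariteits_lijst (sn : List (String × List String)) : List String :=
  let d := PySem.Dict.ofList sn          -- the Python argument is this dict
  -- `for key in sn:` builds popularity_list (dict) and popularity_numbers (list) together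
  let st := d.keys.foldl
      (fun st key => (st.1.insert key ((d.getD key []).length : Int),
                      st.2 ++ [((d.getD key []).length : Int)]))
      ((PySem.Dict.empty : PySem.Dict String Int), ([] : List Int))
  let popularity_numbers := PySem.List.sorted st.2 (fun x => x) true
  let popularity_people := PySem.List.sorted st.1.keys (fun x => x) false
  pvOuterA st.1 popularity_numbers popularity_people []

-- ===== PORT B =====
def geef_populariteits_lijst_alt (sn : List (String × List String)) : List String :=
  let d := PySem.Dict.ofList sn          -- the Python argument is this dict
  -- buckets.setdefault(len(sn[name]), []).append(name)  =  modify with default []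
  let buckets := d.keys.foldl
      (fun b name => b.modify ((d.getD name []).length : Int) [] (· ++ [name]))
      (PySem.Dict.empty : PySem.Dict Int (List String))
  (PySem.List.sorted buckets.keys (fun x => x) true).foldl
      (fun res count => res ++ PySem.List.sorted (buckets.getD count []) (fun x => x) false) []

-- ===== PRECONDITION & SPEC =====
def Spec_geef_populariteits_lijst (sn : List (String × List String)) (out : List String) : Prop := out = geef_populariteits_lijst_alt sn
instance (sn : List (String × List String)) (out : List String) : Decidable (Spec_geef_populariteits_lijst sn out) := by unfold Spec_geef_populariteits_lijst; infer_instance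

-- ===== CLAIM (what is proved, stated in full; the proofs are below) =====
def Claim_equal_geef_populariteits_lijst : Prop := ∀ (sn : List (String × List String)), Dom_geef_populariteits_lijst sn → Spec_geef_populariteits_lijst sn (geef_populariteits_lijst sn)

-- ===== LEMMAS AND PROOFS =====

-- `list.remove` on a present element is `List.erase`
theorem pv_remove_eq_erase (xs : List String) (k : String) (h : k ∈ xs) :
    PySem.List.remove? xs k = some (xs.erase k) := by
  induction xs with
  | nil => simp at h
  | cons a t ih =>
    by_cases hk : a = k
    · simp [PySem.List.remove?, List.idxOf?_cons, hk, List.erase_cons_head]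
    · have hb : (a == k) = false := by simp [hk]
      have hm : k ∈ t := by
        rcases List.mem_cons.mp h with h1 | h1
        · exact absurd h1.symm hk
        · exact h1
      have hr := ih hm
      simp only [PySem.List.remove?] at hr ⊢
      cases hidx : List.idxOf? k t with
      | none => simp [hidx] at hr
      | some i =>
        simp only [hidx, Option.map_some] at hr
        simp [List.idxOf?_cons, hb, hidx, ← Option.some_inj.mp hr]

-- value recorded by the popularity_list-building loop
theorem pv_getD_insert_fold (K : List String) (f : String → Int) (pl : PySem.Dict String Int)
    (x : String) :
    (K.foldl (fun pl k => pl.insert k (f k)) pl).getD x 0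
      = if x ∈ K then f x else pl.getD x 0 := by
  induction K generalizing pl with
  | nil => simp
  | cons k K ih =>
    simp only [List.foldl_cons, ih, PySem.Dict.getD_insert, List.mem_cons]
    by_cases h1 : x ∈ K
    · simp [h1]
    · by_cases h2 : x = k <;> simp [h1, h2]

-- A's inner scan finds the first remaining key with the wanted popularity
theorem pv_innerA_eq (pl : PySem.Dict String Int) (c : Int) (people : List String) :
    pvInnerA pl c people = (people.filter (fun k => pl.getD k 0 == c)).head? := by
  induction people with
  | nil => simp [pvInnerA]
  | cons a t ih =>
    by_cases h : (pl.getD a 0 == c)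
    · simp [pvInnerA, h]
    · have hb : (pl.getD a 0 == c) = false := by simpa using h
      simp [pvInnerA, hb, ih]

-- removing the first key satisfying p pops it off the p-filter and leaves the ¬p-filter alone
theorem pv_erase_head_filter (p : String → Bool) (people : List String) (k : String)
    (h : (people.filter p).head? = some k) :
    k ∈ people ∧ (people.erase k).filter p = (people.filter p).tail ∧
      (people.erase k).filter (fun x => !p x) = people.filter (fun x => !p x) := by
  induction people with
  | nil => simp at h
  | cons a t ih =>
    by_cases hp : p a
    · have hpt : p a = true := by simpa using hp
      have hk : a = k := by
        rw [List.filter_cons, if_pos hpt, List.head?_cons] at h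
        exact Option.some_inj.mp h
      subst hk
      simp [List.erase_cons_head, hpt]
    · have hpb : p a = false := by simpa using hp
      have h' : (t.filter p).head? = some k := by simpa [List.filter_cons, hpb] using h
      obtain ⟨hkm, h1, h2⟩ := ih h'
      have hka : k ≠ a := by
        intro hka
        have := List.of_mem_filter (List.mem_of_mem_head? h')
        rw [hka] at this
        simp [hpb] at this
      refine ⟨List.mem_cons_of_mem _ hkm, ?_, ?_⟩
      · rw [List.erase_cons_tail (by simpa using fun h => hka h.symm)]
        simp [hpb, h1]
      · rw [List.erase_cons_tail (by simpa using fun h => hka h.symm)]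
        simp [hpb, h2]

-- one maximal run of equal numbers in A's outer loop extracts the whole bucket in list order
theorem pv_runA (pl : PySem.Dict String Int) (c : Int) (ns' : List Int) :
    ∀ (m : Nat) (people : List String) (acc : List String),
      (people.filter (fun k => pl.getD k 0 == c)).length = m →
      pvOuterA pl (List.replicate m c ++ ns') people acc
        = pvOuterA pl ns' (people.filter (fun k => !(pl.getD k 0 == c)))
            (acc ++ people.filter (fun k => pl.getD k 0 == c)) := by
  intro m
  induction m with
  | zero =>
    intro people acc h
    have hnil : people.filter (fun k => pl.getD k 0 == c) = [] := List.length_eq_zero_iff.mp h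
    have hself : people.filter (fun k => !(pl.getD k 0 == c)) = people := by
      rw [List.filter_eq_self]
      intro x hx
      by_contra hcon
      have hx2 : x ∈ people.filter (fun k => pl.getD k 0 == c) :=
        List.mem_filter.mpr ⟨hx, by simpa using hcon⟩
      simp [hnil] at hx2
    simp [hnil, hself]
  | succ m ih =>
    intro people acc h
    cases hf : people.filter (fun k => pl.getD k 0 == c) with
    | nil => rw [hf] at h; simp at h
    | cons k tl =>
      have hhead : (people.filter (fun k => pl.getD k 0 == c)).head? = some k := by
        rw [hf]; rfl
      obtain ⟨hkm, h1, h2⟩ := pv_erase_head_filter _ people k hhead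
      have hrm : PySem.List.remove? people k = some (people.erase k) :=
        pv_remove_eq_erase people k hkm
      rw [List.replicate_succ, List.cons_append]
      simp only [pvOuterA, pv_innerA_eq, hhead, hrm, Option.getD_some]
      have hlen : ((people.erase k).filter (fun k => pl.getD k 0 == c)).length = m := by
        rw [h1, hf]
        rw [hf] at h
        simpa using h
      rw [ih (people.erase k) (acc ++ [k]) hlen, h2, h1, hf]
      simp

-- a descending list starts with the full run of its head value
theorem pv_desc_decomp (c : Int) : ∀ ns : List Int,
    List.Pairwise (fun a b : Int => b ≤ a) ns → (∀ x ∈ ns, x ≤ c) →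
    ns = List.replicate (ns.count c) c ++ ns.filter (fun x => !(x == c)) := by
  intro ns hps hle
  induction ns with
  | nil => simp
  | cons a t ih =>
    rcases List.pairwise_cons.mp hps with ⟨ha, ht⟩
    by_cases hac : a = c
    · subst hac
      have := ih ht (fun x hx => ha x hx)
      rw [List.count_cons_self, List.replicate_succ]
      calc a :: t = a :: (List.replicate (t.count a) a ++ t.filter (fun x => !(x == a))) := by
            rw [← this]
        _ = _ := by simp
    · have hlt : a < c := lt_of_le_of_ne (hle a (by simp)) hac
      have hcnot : ∀ x ∈ a :: t, x ≠ c := by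
        intro x hx
        rcases List.mem_cons.mp hx with h1 | h1
        · subst h1; exact hac
        · exact ne_of_lt (lt_of_le_of_lt (ha x h1) hlt)
      have hcount : (a :: t).count c = 0 := by
        rw [List.count_eq_zero]
        intro hmem
        exact hcnot c hmem rfl
      rw [hcount]
      simp only [List.replicate_zero, List.nil_append]
      rw [List.filter_eq_self.mpr]
      intro x hx
      simpa using hcnot x hx

-- filtering away one value then selecting another is just selecting the other value
theorem pv_filter_ne (f : String → Int) (people : List String) (c c' : Int) (h : c' ≠ c) :
    (people.filter (fun k => !(f k == c))).filter (fun k => f k == c')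
      = people.filter (fun k => f k == c') := by
  rw [List.filter_comm, List.filter_eq_self.mpr]
  intro a ha
  have : f a = c' := by simpa using (List.mem_filter.mp ha).2
  simp [this, h]

-- selecting a value just filtered away selects nothing
theorem pv_filter_self_ne (f : String → Int) (people : List String) (c : Int) :
    (people.filter (fun k => !(f k == c))).filter (fun k => f k == c) = [] := by
  rw [List.eq_nil_iff_forall_not_mem]
  intro a ha
  have h1 := (List.mem_filter.mp ha).2
  have h2 := (List.mem_filter.mp (List.mem_of_mem_filter ha)).2
  simp at h1
  rw [h1] at h2
  simp at h2

-- the common canonical form: bucket of the current maximum, then recurse on the rest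
def pvCanon (f : String → Int) : List Int → List String → List String
  | [], _ => []
  | c :: ns, people =>
      people.filter (fun k => f k == c)
        ++ pvCanon f (ns.filter (fun x => !(x == c))) (people.filter (fun k => !(f k == c)))
  termination_by ns _ => ns.length
  decreasing_by
    simp only [List.length_cons]
    refine Nat.lt_succ_of_le ?_
    rw [List.length_unattach]
    exact le_trans (List.length_filter_le _ _) (by simp)

theorem pv_mainA (pl : PySem.Dict String Int) (f : String → Int) :
    ∀ (n : Nat) (ns : List Int) (people acc : List String), ns.length ≤ n →
      List.Pairwise (fun a b : Int => b ≤ a) ns →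
      (∀ k ∈ people, pl.getD k 0 = f k) →
      (∀ c : Int, ns.count c = (people.filter (fun k => f k == c)).length) →
      pvOuterA pl ns people acc = acc ++ pvCanon f ns people := by
  intro n
  induction n with
  | zero =>
    intro ns people acc hlen _ _ _
    have hns : ns = [] := List.length_eq_zero_iff.mp (Nat.le_zero.mp hlen)
    subst hns
    simp [pvOuterA, pvCanon]
  | succ n ih =>
    intro ns people acc hlen hsort hpl hcount
    cases ns with
    | nil => simp [pvOuterA, pvCanon]
    | cons c rest =>
      have hle : ∀ x ∈ c :: rest, x ≤ c := by
        intro x hx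
        rcases List.mem_cons.mp hx with h1 | h1
        · exact le_of_eq h1
        · exact (List.pairwise_cons.mp hsort).1 x h1
      have hdec := pv_desc_decomp c (c :: rest) hsort hle
      have hfq : people.filter (fun k => pl.getD k 0 == c)
          = people.filter (fun k => f k == c) :=
        List.filter_congr (fun k hk => by rw [hpl k hk])
      have hfnq : people.filter (fun k => !(pl.getD k 0 == c))
          = people.filter (fun k => !(f k == c)) :=
        List.filter_congr (fun k hk => by rw [hpl k hk])
      have hstep := pv_runA pl c ((c :: rest).filter (fun x => !(x == c)))
        ((c :: rest).count c) people acc (by rw [hfq]; exact (hcount c).symm)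
      rw [show pvOuterA pl (c :: rest) people acc
            = pvOuterA pl (List.replicate ((c :: rest).count c) c
                ++ (c :: rest).filter (fun x => !(x == c))) people acc from by
              conv_lhs => rw [hdec]]
      rw [hstep, hfq, hfnq]
      have hfilter_cons : (c :: rest).filter (fun x => !(x == c))
          = rest.filter (fun x => !(x == c)) := by simp
      rw [hfilter_cons]
      have hlen' : (rest.filter (fun x => !(x == c))).length ≤ n :=
        le_trans (List.length_filter_le _ _) (by simpa using Nat.succ_le_succ_iff.mp hlen)
      have hsort' : List.Pairwise (fun a b : Int => b ≤ a)
          (rest.filter (fun x => !(x == c))) :=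
        List.Pairwise.filter _ (List.pairwise_cons.mp hsort).2
      have hpl' : ∀ k ∈ people.filter (fun k => !(f k == c)), pl.getD k 0 = f k :=
        fun k hk => hpl k (List.mem_of_mem_filter hk)
      have hcount' : ∀ c' : Int, (rest.filter (fun x => !(x == c))).count c'
          = ((people.filter (fun k => !(f k == c))).filter (fun k => f k == c')).length := by
        intro c'
        by_cases hcc : c' = c
        · subst hcc
          rw [pv_filter_self_ne]
          rw [List.count_eq_zero.mpr]
          · rfl
          · intro hmem
            have := (List.mem_filter.mp hmem).2
            simp at this
        · rw [pv_filter_ne f people c c' hcc]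
          rw [List.count_filter (by simpa using hcc)]
          have : (c :: rest).count c' = (people.filter (fun k => f k == c')).length :=
            hcount c'
          simp only [List.count_cons, beq_iff_eq, Ne.symm hcc, if_false, add_zero] at this
          exact this
      rw [ih (rest.filter (fun x => !(x == c))) (people.filter (fun k => !(f k == c)))
        (acc ++ people.filter (fun k => f k == c)) hlen' hsort' hpl' hcount']
      conv_rhs => rw [pvCanon]
      rw [List.append_assoc]

theorem pv_bridge (f : String → Int) :
    ∀ (n : Nat) (ns cs : List Int) (people : List String), ns.length ≤ n →
      List.Pairwise (fun a b : Int => b ≤ a) ns →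
      List.Pairwise (fun a b : Int => b ≤ a) cs → cs.Nodup →
      (∀ x : Int, x ∈ cs ↔ x ∈ ns) →
      pvCanon f ns people = cs.flatMap (fun c => people.filter (fun k => f k == c)) := by
  intro n
  induction n with
  | zero =>
    intro ns cs people hlen _ _ _ hmem
    have hns : ns = [] := List.length_eq_zero_iff.mp (Nat.le_zero.mp hlen)
    subst hns
    have hcs : cs = [] := List.eq_nil_iff_forall_not_mem.mpr
      (fun x hx => by simpa using (hmem x).mp hx)
    subst hcs
    simp [pvCanon]
  | succ n ih =>
    intro ns cs people hlen hns hcs hnd hmem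
    cases ns with
    | nil =>
      have hcs : cs = [] := List.eq_nil_iff_forall_not_mem.mpr
        (fun x hx => by simpa using (hmem x).mp hx)
      subst hcs
      simp [pvCanon]
    | cons c rest =>
      cases cs with
      | nil => exact absurd ((hmem c).mpr (by simp)) (by simp)
      | cons c0 cs' =>
        have hc0c : c0 = c := by
          have h1 : c0 ≤ c := by
            rcases List.mem_cons.mp ((hmem c0).mp (by simp)) with h | h
            · exact le_of_eq h
            · exact (List.pairwise_cons.mp hns).1 c0 h
          have h2 : c ≤ c0 := by
            rcases List.mem_cons.mp ((hmem c).mpr (by simp)) with h | h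
            · exact le_of_eq h
            · exact (List.pairwise_cons.mp hcs).1 c h
          exact le_antisymm h1 h2
        subst hc0c
        have hc_not : c0 ∉ cs' := (List.nodup_cons.mp hnd).1
        have hlen' : (rest.filter (fun x => !(x == c0))).length ≤ n :=
          le_trans (List.length_filter_le _ _) (by simpa using Nat.succ_le_succ_iff.mp hlen)
        have hns' : List.Pairwise (fun a b : Int => b ≤ a)
            (rest.filter (fun x => !(x == c0))) :=
          List.Pairwise.filter _ (List.pairwise_cons.mp hns).2
        have hcs' : List.Pairwise (fun a b : Int => b ≤ a) cs' :=
          (List.pairwise_cons.mp hcs).2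
        have hnd' : cs'.Nodup := (List.nodup_cons.mp hnd).2
        have hmem' : ∀ x : Int, x ∈ cs' ↔ x ∈ rest.filter (fun x => !(x == c0)) := by
          intro x
          constructor
          · intro hx
            have hxc : x ≠ c0 := fun h => hc_not (h ▸ hx)
            have : x ∈ c0 :: rest := (hmem x).mp (List.mem_cons_of_mem _ hx)
            rcases List.mem_cons.mp this with h | h
            · exact absurd h hxc
            · exact List.mem_filter.mpr ⟨h, by simpa using hxc⟩
          · intro hx
            obtain ⟨hxr, hxc⟩ := List.mem_filter.mp hx
            have hxc' : x ≠ c0 := by simpa using hxc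
            rcases List.mem_cons.mp ((hmem x).mpr (List.mem_cons_of_mem _ hxr)) with h | h
            · exact absurd h hxc'
            · exact h
        rw [List.flatMap_cons]
        conv_lhs => rw [pvCanon]
        congr 1
        rw [ih (rest.filter (fun x => !(x == c0))) cs'
          (people.filter (fun k => !(f k == c0))) hlen' hns' hcs' hnd' hmem']
        rw [List.flatMap_def, List.flatMap_def]
        congr 1
        apply List.map_congr_left
        intro c' hc'
        have : c' ≠ c0 := fun h => hc_not (h ▸ hc')
        exact pv_filter_ne f people c0 c' this

-- both programs, after their bookkeeping, are the per-count buckets in descending count order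
theorem pv_assemble (K : List String) (F : String → Int) (hKnd : K.Nodup) :
    pvOuterA (K.foldl (fun pl key => pl.insert key (F key)) PySem.Dict.empty)
      (PySem.List.sorted (K.map F) (fun x => x) true)
      (PySem.List.sorted K (fun x => x) false) []
    = (PySem.List.sorted (PySem.Set.ofList (K.map F)) (fun x => x) true).flatMap
        (fun count => PySem.List.sorted
          ((K.foldl (fun b name => b.modify (F name) [] (fun x => x ++ [name]))
              PySem.Dict.empty).getD count [])
          (fun x => x) false) := by
  have hpl : ∀ k ∈ PySem.List.sorted K (fun x => x) false,
      (K.foldl (fun pl key => pl.insert key (F key)) PySem.Dict.empty).getD k 0 = F k := by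
    intro k hk
    rw [pv_getD_insert_fold]
    rw [if_pos ((PySem.List.mem_sorted K _ false k).mp hk)]
  have hsort_ns : (PySem.List.sorted (K.map F) (fun x => x) true).Pairwise
      (fun a b : Int => b ≤ a) := by
    simpa using PySem.List.sorted_pairwise_rev (K.map F) (fun x => x)
  have hcount : ∀ c : Int, (PySem.List.sorted (K.map F) (fun x => x) true).count c
      = ((PySem.List.sorted K (fun x => x) false).filter (fun k => F k == c)).length := by
    intro c
    calc (PySem.List.sorted (K.map F) (fun x => x) true).count c
        = (K.map F).count c := (PySem.List.sorted_perm (K.map F) _ true).count_eq c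
      _ = (K.filter (fun k => F k == c)).length := by
          rw [List.count_eq_countP, List.countP_map, List.countP_eq_length_filter]
          simp [Function.comp_def]
      _ = ((PySem.List.sorted K (fun x => x) false).filter (fun k => F k == c)).length :=
          (((PySem.List.sorted_perm K (fun x => x) false).filter _).length_eq).symm
  rw [pv_mainA (K.foldl (fun pl key => pl.insert key (F key)) PySem.Dict.empty) F
    (PySem.List.sorted (K.map F) (fun x => x) true).length _ _ [] le_rfl hsort_ns hpl hcount]
  rw [List.nil_append]
  have hSnd : (PySem.Set.ofList (K.map F)).Nodup := PySem.Set.nodup_ofList _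
  have hcs_sort : (PySem.List.sorted (PySem.Set.ofList (K.map F)) (fun x => x) true).Pairwise
      (fun a b : Int => b ≤ a) := by
    simpa using PySem.List.sorted_pairwise_rev (PySem.Set.ofList (K.map F)) (fun x => x)
  have hcs_nd : (PySem.List.sorted (PySem.Set.ofList (K.map F)) (fun x => x) true).Nodup :=
    (PySem.List.sorted_perm (PySem.Set.ofList (K.map F)) _ true).symm.nodup hSnd
  have hcs_mem : ∀ x : Int,
      x ∈ PySem.List.sorted (PySem.Set.ofList (K.map F)) (fun x => x) true
        ↔ x ∈ PySem.List.sorted (K.map F) (fun x => x) true := by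
    intro x
    rw [PySem.List.mem_sorted, PySem.List.mem_sorted, PySem.Set.mem_ofList]
  rw [pv_bridge F (PySem.List.sorted (K.map F) (fun x => x) true).length _ _ _
    le_rfl hsort_ns hcs_sort hcs_nd hcs_mem]
  have hgetD : ∀ c : Int,
      (K.foldl (fun b name => b.modify (F name) [] (fun x => x ++ [name]))
          PySem.Dict.empty).getD c []
        = K.filter (fun k => F k == c) := by
    intro c
    rw [show K.foldl (fun b name => b.modify (F name) [] (fun x => x ++ [name]))
          PySem.Dict.empty
        = (K.map (fun k => (F k, k))).foldl
            (fun d p => d.modify p.1 [] (fun x => x ++ [p.2])) PySem.Dict.empty from by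
      rw [List.foldl_map]]
    rw [PySem.Dict.getD_foldl_modify_append]
    simp [List.filter_map, Function.comp_def]
  have hpnd : (PySem.List.sorted K (fun x => x) false).Nodup :=
    (PySem.List.sorted_perm K (fun x => x) false).symm.nodup hKnd
  have hlt : (PySem.List.sorted K (fun x => x) false).Pairwise (fun a b => a < b) := by
    have h1 : (PySem.List.sorted K (fun x => x) false).Pairwise (fun a b => a ≤ b) := by
      simpa using PySem.List.sorted_pairwise K (fun x => x)
    exact (h1.and hpnd).imp (fun h => lt_of_le_of_ne h.1 h.2)
  have hgroup : ∀ c : Int,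
      PySem.List.sorted (K.filter (fun k => F k == c)) (fun x => x) false
        = (PySem.List.sorted K (fun x => x) false).filter (fun k => F k == c) := by
    intro c
    exact PySem.List.sorted_eq_of_perm_of_pairwise_lt _ _ _
      ((PySem.List.sorted_perm K (fun x => x) false).filter _)
      (by simpa using hlt.filter (fun k => F k == c))
  simp only [hgetD, hgroup]

theorem pv_A_eq_B (sn : List (String × List String)) :
    geef_populariteits_lijst sn = geef_populariteits_lijst_alt sn := by
  simp only [geef_populariteits_lijst, geef_populariteits_lijst_alt]
  rw [PySem.List.foldl_prod_mk
    (f := fun (pl : PySem.Dict String Int) key =>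
      pl.insert key (((PySem.Dict.ofList sn).getD key []).length : Int))
    (g := fun (ns : List Int) key =>
      ns ++ [(((PySem.Dict.ofList sn).getD key []).length : Int)])]
  dsimp only
  have hKnd : (PySem.Dict.ofList sn).keys.Nodup := PySem.Dict.nodup_keys_ofList sn
  rw [PySem.List.foldl_append_singleton_eq_map
    (f := fun key => (((PySem.Dict.ofList sn).getD key []).length : Int))]
  rw [List.nil_append]
  rw [PySem.Dict.keys_foldl_insert (ν := Int) (PySem.Dict.ofList sn).keys
    (fun _ key => (((PySem.Dict.ofList sn).getD key []).length : Int)) PySem.Dict.empty]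
  rw [PySem.Dict.keys_empty, PySem.Set.update_nil_left,
    PySem.Set.ofList_eq_self_of_nodup _ hKnd]
  rw [PySem.Dict.keys_foldl_modify_key (ν := List String) (PySem.Dict.ofList sn).keys
    (fun name => (((PySem.Dict.ofList sn).getD name []).length : Int)) []
    (fun _ name v => v ++ [name]) PySem.Dict.empty]
  rw [PySem.Dict.keys_empty, PySem.Set.update_nil_left]
  rw [PySem.List.foldl_append_eq_flatMap]
  rw [List.nil_append]
  exact pv_assemble (PySem.Dict.ofList sn).keys
    (fun k => (((PySem.Dict.ofList sn).getD k []).length : Int)) hKnd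

-- ===== VERDICT (by name: the statement is the Claim_ definition above) =====
theorem geef_populariteits_lijst_spec : Claim_equal_geef_populariteits_lijst := by
  intro sn _
  unfold Spec_geef_populariteits_lijst
  exact pv_A_eq_B sn
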